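-- pv_equiv track=rewrite | github.com/hhheegunnn/Algorithm_PS | boj/implementation/삼성sw역량/boj_G5_주사위굴리기_Heegun.py | move_dice
-- ===== SOURCE A (Python) =====
-- def move_dice(dice,di):
--
--     tmp = [0 for _ in range(7)]
--     if di == 1:
--         tmp[1],tmp[2],tmp[3],tmp[4],tmp[5],tmp[6] = dice[4],dice[2],dice[1],dice[6],dice[5],dice[3]
--     elif di == 2:
--         tmp[1],tmp[2],tmp[3],tmp[4],tmp[5],tmp[6] = dice[3],dice[2],dice[6],dice[1],dice[5],dice[4]
--     elif di == 3:
--         tmp[1],tmp[2],tmp[3],tmp[4],tmp[5],tmp[6] = dice[5],dice[1],dice[3],dice[4],dice[6],dice[2]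
--     else:
--         tmp[1],tmp[2],tmp[3],tmp[4],tmp[5],tmp[6] = dice[2],dice[6],dice[3],dice[4],dice[1],dice[5]
--
--     return tmp
-- ===== SOURCE B (Python) =====
-- # Copy the dice, then rotate the single 4-face cycle that the roll moves, one step.
-- def move_dice(dice, di):
--     tmp = [0] + [dice[i] for i in range(1, 7)]
--     # east/west rolls turn the cycle 1-4-6-3; north/south rolls turn 1-5-6-2
--     cyc = [1, 4, 6, 3] if di == 1 or di == 2 else [1, 5, 6, 2]
--     if di != 1 and di != 3:      # west and the default (south) are the reverse turns
--         cyc = cyc[::-1]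
--     for a, b in zip(cyc, cyc[1:] + cyc[:1]):
--         tmp[a] = dice[b]
--     return tmp
-- ===== Notes on version B (the rewrite author's own statement) =====
-- stated objective: alternative
-- what changed: Instead of writing all six faces per direction from an if/elif chain, B copies the dice once and then rotates only the 4-face cycle the roll actually moves (1-4-6-3 for east/west, 1-5-6-2 otherwise, reversed for the inverse direction), updating four slots in a zip loop.
import Mathlib
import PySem

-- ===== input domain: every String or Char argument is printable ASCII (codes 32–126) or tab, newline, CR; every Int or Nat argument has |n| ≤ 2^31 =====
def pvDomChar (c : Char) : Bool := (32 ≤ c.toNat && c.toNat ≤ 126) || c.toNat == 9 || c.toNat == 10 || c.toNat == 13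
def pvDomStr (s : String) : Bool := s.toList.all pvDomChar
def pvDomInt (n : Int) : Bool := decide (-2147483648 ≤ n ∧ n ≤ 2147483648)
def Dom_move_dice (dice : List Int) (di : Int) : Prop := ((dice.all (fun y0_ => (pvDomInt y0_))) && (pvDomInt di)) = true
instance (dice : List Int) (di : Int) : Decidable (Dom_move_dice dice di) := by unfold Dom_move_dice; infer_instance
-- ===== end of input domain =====

-- B copies the dice and rotates only the 4-face cycle the roll moves (alternative decomposition; return-value equivalence).


-- ===== PORT A =====
-- each branch fills tmp[1..6] from fixed dice indices; IndexError (len < 7) excluded by Pre_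
def move_dice (dice : List Int) (di : Int) : List Int :=
  let g : Int → Int := fun i => PySem.List.pyGetD dice i 0
  if di == 1 then [0, g 4, g 2, g 1, g 6, g 5, g 3]
  else if di == 2 then [0, g 3, g 2, g 6, g 1, g 5, g 4]
  else if di == 3 then [0, g 5, g 1, g 3, g 4, g 6, g 2]
  else [0, g 2, g 6, g 3, g 4, g 1, g 5]

-- ===== PORT B =====
-- copy dice[1..6], pick the moved 4-cycle (reversed for the inverse direction), rotate it via a zip fold
def move_dice_alt (dice : List Int) (di : Int) : List Int :=
  let tmp0 : List Int := 0 :: (PySem.List.pyRange 1 7 1).map (fun i => PySem.List.pyGetD dice i 0)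
  let cyc0 : List Int := if di == 1 || di == 2 then [1, 4, 6, 3] else [1, 5, 6, 2]
  let cyc : List Int := if di != 1 && di != 3 then cyc0.reverse else cyc0
  (List.zip cyc (cyc.drop 1 ++ cyc.take 1)).foldl
    (fun tmp ab => PySem.List.pySetD tmp ab.1 (PySem.List.pyGetD dice ab.2 0)) tmp0

-- ===== PRECONDITION & SPEC =====
-- Pre_ excludes exactly the inputs where A raises IndexError: every branch reads dice[1]..dice[6]
def Pre_move_dice (dice : List Int) (di : Int) : Prop := 7 ≤ dice.length
instance (dice : List Int) (di : Int) : Decidable (Pre_move_dice dice di) := by unfold Pre_move_dice; infer_instance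
def pvWitness_move_dice : List Int × Int := ([1, 2, 3, 4, 5, 6, 7], 1)
def Spec_move_dice (dice : List Int) (di : Int) (out : List Int) : Prop := out = move_dice_alt dice di
instance (dice : List Int) (di : Int) (out : List Int) : Decidable (Spec_move_dice dice di out) := by unfold Spec_move_dice; infer_instance

-- ===== CLAIM =====
def Claim_equal_move_dice : Prop := ∀ (dice : List Int) (di : Int), Dom_move_dice dice di → Pre_move_dice dice di → Spec_move_dice dice di (move_dice dice di)

-- ===== LEMMAS AND PROOFS =====

-- ===== VERDICT =====
theorem move_dice_spec : Claim_equal_move_dice := by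
  intro dice di _ _
  unfold Spec_move_dice move_dice move_dice_alt
  by_cases h1 : di = 1
  · subst h1; rfl
  · by_cases h2 : di = 2
    · subst h2; rfl
    · by_cases h3 : di = 3
      · subst h3; rfl
      · have e1 : (di == 1) = false := by simp [h1]
        have e2 : (di == 2) = false := by simp [h2]
        have e3 : (di == 3) = false := by simp [h3]
        simp only [e1, e2, e3, Bool.or_self, Bool.not_false, Bool.and_self,
          Bool.false_or, bne, if_false, if_true]
        rfl
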